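-- pv_equiv track=rewrite | github.com/steve-jang/Advent-of-Code | Day24/day24.py | simplify_tile
-- ===== SOURCE A (Python) =====
-- def simplify_tile(tile_pos):
--     # Remove redundant directions (e.g. nw then se), and change all
--     # directions to be one of e, s, ne, and sw. Use a skewed-axis
--     # coordinate system to represent the tile position, where the
--     # positive x axis is the e direction, and the positive y axis is
--     # the ne direction. Return the coordinate.
--     direction_freq = {pos: 0 for pos in ["nw", "ne", "sw", "se", "w", "e"]}
--
--     # First change all nw to w ne, and all se to e sw.
--     for direction in tile_pos:
--         if direction == "nw":
--             direction_freq["w"] += 1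
--             direction_freq["ne"] += 1
--         elif direction == "se":
--             direction_freq["e"] += 1
--             direction_freq["sw"] += 1
--         else:
--             direction_freq[direction] += 1
--
--     east_dir = direction_freq["e"] - direction_freq["w"]
--     ne_dir = direction_freq["ne"] - direction_freq["sw"]
--     return east_dir, ne_dir
-- ===== SOURCE B (Python) =====
-- DELTA = {"e": (1, 0), "w": (-1, 0), "ne": (0, 1), "sw": (0, -1),
--          "nw": (-1, 1), "se": (1, -1)}
--
--
-- def simplify_tile(tile_pos):
--     # Divide and conquer: the coordinate of a walk is the vector sum of
--     # the coordinates of its two halves; a single step is looked up.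
--     if not tile_pos:
--         return 0, 0
--     if len(tile_pos) == 1:
--         return DELTA[tile_pos[0]]
--     mid = len(tile_pos) // 2
--     e1, n1 = simplify_tile(tile_pos[:mid])
--     e2, n2 = simplify_tile(tile_pos[mid:])
--     return e1 + e2, n1 + n2
-- ===== Notes on version B (the rewrite author's own statement) =====
-- stated objective: alternative
-- what changed: Replaces A's left-to-right loop tallying a 6-key frequency dict (with inline nw/se expansion and final subtractions) by divide-and-conquer recursion: split the walk in half, recurse, and add the two half-coordinates componentwise, with a fixed per-direction delta table at single-step leaves.
import Mathlib
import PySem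

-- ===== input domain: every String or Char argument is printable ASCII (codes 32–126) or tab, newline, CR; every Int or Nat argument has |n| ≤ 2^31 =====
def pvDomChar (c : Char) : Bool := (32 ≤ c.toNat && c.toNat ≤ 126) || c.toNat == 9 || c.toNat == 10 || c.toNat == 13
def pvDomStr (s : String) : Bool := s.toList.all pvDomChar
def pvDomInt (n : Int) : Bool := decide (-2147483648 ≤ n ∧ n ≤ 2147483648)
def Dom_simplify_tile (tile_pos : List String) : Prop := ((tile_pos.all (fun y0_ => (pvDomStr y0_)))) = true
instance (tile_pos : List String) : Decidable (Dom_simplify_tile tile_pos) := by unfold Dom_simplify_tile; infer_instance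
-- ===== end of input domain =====

-- B replaces A's left-to-right tallying loop over a 6-key frequency dict (with
-- inline nw/se expansion and final subtractions) by divide-and-conquer
-- recursion over the two halves of the walk; same cost, different algorithm
-- shape.


-- ===== PORT A =====
-- the body of A's for-loop (direction_freq[k] += 1 is d.modify k 0 (· + 1);
-- inside Pre_ every accessed key is present, so no KeyError arises)
def aStep (d : PySem.Dict String Int) (direction : String) : PySem.Dict String Int :=
  if direction == "nw" then
    (d.modify "w" 0 (· + 1)).modify "ne" 0 (· + 1)
  else if direction == "se" then
    (d.modify "e" 0 (· + 1)).modify "sw" 0 (· + 1)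
  else
    d.modify direction 0 (· + 1)

def simplify_tile (tile_pos : List String) : Int × Int :=
  let direction_freq : PySem.Dict String Int :=
    PySem.Dict.ofList [("nw", 0), ("ne", 0), ("sw", 0), ("se", 0), ("w", 0), ("e", 0)]
  let direction_freq := tile_pos.foldl aStep direction_freq
  let east_dir := direction_freq.getD "e" 0 - direction_freq.getD "w" 0
  let ne_dir := direction_freq.getD "ne" 0 - direction_freq.getD "sw" 0
  (east_dir, ne_dir)

-- ===== PORT B =====
def DELTA : PySem.Dict String (Int × Int) :=
  PySem.Dict.ofList [("e", (1, 0)), ("w", (-1, 0)), ("ne", (0, 1)), ("sw", (0, -1)),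
                     ("nw", (-1, 1)), ("se", (1, -1))]

-- divide-and-conquer recursion of Source B; tile_pos[:mid] / tile_pos[mid:] are
-- List.take / List.drop (exact here: 0 ≤ mid ≤ len), tile_pos[0] in the
-- length-1 branch is headI (exact: the list is nonempty), and DELTA[...] is
-- getD (exact inside Pre_, where the key is present; Python raises KeyError
-- outside Pre_)
def simplify_tile_alt (tile_pos : List String) : Int × Int :=
  if h0 : tile_pos = [] then (0, 0)
  else if h1 : tile_pos.length = 1 then
    DELTA.getD tile_pos.headI (0, 0)
  else
    let mid := tile_pos.length / 2
    let p := simplify_tile_alt (tile_pos.take mid)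
    let q := simplify_tile_alt (tile_pos.drop mid)
    (p.1 + q.1, p.2 + q.2)
termination_by tile_pos.length
decreasing_by
  · have : tile_pos.length ≠ 0 := fun h => h0 (List.length_eq_zero_iff.mp h)
    simp [List.length_take]; omega
  · have : tile_pos.length ≠ 0 := fun h => h0 (List.length_eq_zero_iff.mp h)
    simp [List.length_drop]; omega

-- ===== PRECONDITION & SPEC =====
-- Pre_ admits exactly the direction names A's dict carries; on any other
-- element the Python A raises KeyError.
def Pre_simplify_tile (tile_pos : List String) : Prop :=
  ∀ s ∈ tile_pos, s ∈ (["nw", "ne", "sw", "se", "w", "e"] : List String)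
instance (tile_pos : List String) : Decidable (Pre_simplify_tile tile_pos) := by
  unfold Pre_simplify_tile; infer_instance

def pvWitness_simplify_tile : List String := ["se", "nw", "e", "sw", "e"]

def Spec_simplify_tile (tile_pos : List String) (out : Int × Int) : Prop := out = simplify_tile_alt tile_pos
instance (tile_pos : List String) (out : Int × Int) : Decidable (Spec_simplify_tile tile_pos out) := by unfold Spec_simplify_tile; infer_instance

-- ===== CLAIM (what is proved, stated in full; the proofs are below) =====
def Claim_equal_simplify_tile : Prop := ∀ (tile_pos : List String), Dom_simplify_tile tile_pos → Pre_simplify_tile tile_pos → Spec_simplify_tile tile_pos (simplify_tile tile_pos)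

-- ===== LEMMAS AND PROOFS =====

-- one step of A's loop, seen through the "e" entry
lemma aStep_e (D : PySem.Dict String Int) (s : String) :
    (aStep D s).getD "e" 0 = D.getD "e" 0 + (if s = "e" then 1 else 0) + (if s = "se" then 1 else 0) := by
  by_cases e1 : s = "nw"
  · subst e1; simp [aStep, PySem.Dict.getD_modify]
  by_cases e2 : s = "se"
  · subst e2; simp [aStep, PySem.Dict.getD_modify]
  by_cases e3 : s = "e"
  · subst e3; simp [aStep]
  by_cases e4 : s = "w"
  · subst e4; simp [aStep, PySem.Dict.getD_modify]
  by_cases e5 : s = "ne"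
  · subst e5; simp [aStep, PySem.Dict.getD_modify]
  by_cases e6 : s = "sw"
  · subst e6; simp [aStep, PySem.Dict.getD_modify]
  simp [aStep, e1, e2, PySem.Dict.getD_modify, Ne.symm e3, e3]

-- one step of A's loop, seen through the "w" entry
lemma aStep_w (D : PySem.Dict String Int) (s : String) :
    (aStep D s).getD "w" 0 = D.getD "w" 0 + (if s = "w" then 1 else 0) + (if s = "nw" then 1 else 0) := by
  by_cases e1 : s = "nw"
  · subst e1; simp [aStep, PySem.Dict.getD_modify]
  by_cases e2 : s = "se"
  · subst e2; simp [aStep, PySem.Dict.getD_modify]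
  by_cases e3 : s = "e"
  · subst e3; simp [aStep, PySem.Dict.getD_modify]
  by_cases e4 : s = "w"
  · subst e4; simp [aStep]
  by_cases e5 : s = "ne"
  · subst e5; simp [aStep, PySem.Dict.getD_modify]
  by_cases e6 : s = "sw"
  · subst e6; simp [aStep, PySem.Dict.getD_modify]
  simp [aStep, e1, e2, PySem.Dict.getD_modify, Ne.symm e4, e4]

-- one step of A's loop, seen through the "ne" entry
lemma aStep_ne (D : PySem.Dict String Int) (s : String) :
    (aStep D s).getD "ne" 0 = D.getD "ne" 0 + (if s = "ne" then 1 else 0) + (if s = "nw" then 1 else 0) := by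
  by_cases e1 : s = "nw"
  · subst e1; simp [aStep, PySem.Dict.getD_modify]
  by_cases e2 : s = "se"
  · subst e2; simp [aStep, PySem.Dict.getD_modify]
  by_cases e3 : s = "e"
  · subst e3; simp [aStep, PySem.Dict.getD_modify]
  by_cases e4 : s = "w"
  · subst e4; simp [aStep, PySem.Dict.getD_modify]
  by_cases e5 : s = "ne"
  · subst e5; simp [aStep]
  by_cases e6 : s = "sw"
  · subst e6; simp [aStep, PySem.Dict.getD_modify]
  simp [aStep, e1, e2, PySem.Dict.getD_modify, Ne.symm e5, e5]

-- one step of A's loop, seen through the "sw" entry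
lemma aStep_sw (D : PySem.Dict String Int) (s : String) :
    (aStep D s).getD "sw" 0 = D.getD "sw" 0 + (if s = "sw" then 1 else 0) + (if s = "se" then 1 else 0) := by
  by_cases e1 : s = "nw"
  · subst e1; simp [aStep, PySem.Dict.getD_modify]
  by_cases e2 : s = "se"
  · subst e2; simp [aStep, PySem.Dict.getD_modify]
  by_cases e3 : s = "e"
  · subst e3; simp [aStep, PySem.Dict.getD_modify]
  by_cases e4 : s = "w"
  · subst e4; simp [aStep, PySem.Dict.getD_modify]
  by_cases e5 : s = "ne"
  · subst e5; simp [aStep, PySem.Dict.getD_modify]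
  by_cases e6 : s = "sw"
  · subst e6; simp [aStep]
  simp [aStep, e1, e2, PySem.Dict.getD_modify, Ne.symm e6, e6]

-- invariant of A's loop: each of the four relevant dict entries equals its
-- starting value plus the counts of the directions that bump it
lemma loop_counts (l : List String) (D : PySem.Dict String Int) :
    (l.foldl aStep D).getD "e" 0 = D.getD "e" 0 + List.count "e" l + List.count "se" l ∧
    (l.foldl aStep D).getD "w" 0 = D.getD "w" 0 + List.count "w" l + List.count "nw" l ∧
    (l.foldl aStep D).getD "ne" 0 = D.getD "ne" 0 + List.count "ne" l + List.count "nw" l ∧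
    (l.foldl aStep D).getD "sw" 0 = D.getD "sw" 0 + List.count "sw" l + List.count "se" l := by
  induction l generalizing D with
  | nil => simp
  | cons s t ih =>
    simp only [List.foldl_cons]
    obtain ⟨h1, h2, h3, h4⟩ := ih (aStep D s)
    refine ⟨?_, ?_, ?_, ?_⟩
    · rw [h1, aStep_e]; simp [List.count_cons]; split_ifs <;> ring
    · rw [h2, aStep_w]; simp [List.count_cons]; split_ifs <;> ring
    · rw [h3, aStep_ne]; simp [List.count_cons]; split_ifs <;> ring
    · rw [h4, aStep_sw]; simp [List.count_cons]; split_ifs <;> ring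

-- the skewed-axis coordinate as a closed form over direction counts: the
-- common yardstick both ports are reduced to
def cForm (l : List String) : Int × Int :=
  ((List.count "e" l : Int) + List.count "se" l - List.count "w" l - List.count "nw" l,
   (List.count "ne" l : Int) + List.count "nw" l - List.count "sw" l - List.count "se" l)

-- A's port computes the closed form (on every list: unknown names only touch
-- dict entries the final subtractions never read)
lemma a_eq_cForm (l : List String) : simplify_tile l = cForm l := by
  unfold simplify_tile cForm
  obtain ⟨h1, h2, h3, h4⟩ := loop_counts l
    (PySem.Dict.ofList [("nw", 0), ("ne", 0), ("sw", 0), ("se", 0), ("w", 0), ("e", 0)])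
  have e0 : (PySem.Dict.ofList [("nw", (0:Int)), ("ne", 0), ("sw", 0), ("se", 0), ("w", 0), ("e", 0)]).getD "e" 0 = 0 := by decide
  have w0 : (PySem.Dict.ofList [("nw", (0:Int)), ("ne", 0), ("sw", 0), ("se", 0), ("w", 0), ("e", 0)]).getD "w" 0 = 0 := by decide
  have n0 : (PySem.Dict.ofList [("nw", (0:Int)), ("ne", 0), ("sw", 0), ("se", 0), ("w", 0), ("e", 0)]).getD "ne" 0 = 0 := by decide
  have s0 : (PySem.Dict.ofList [("nw", (0:Int)), ("ne", 0), ("sw", 0), ("se", 0), ("w", 0), ("e", 0)]).getD "sw" 0 = 0 := by decide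
  simp only [h1, h2, h3, h4, e0, w0, n0, s0, Prod.mk.injEq]
  constructor <;> ring

-- B's recursion computes the closed form on lists of known direction names:
-- counts are additive across the split, and each leaf is one of six literals
lemma b_eq_cForm (l : List String)
    (hp : ∀ s ∈ l, s ∈ (["nw", "ne", "sw", "se", "w", "e"] : List String)) :
    simplify_tile_alt l = cForm l := by
  induction l using simplify_tile_alt.induct with
  | case1 => rw [simplify_tile_alt]; simp [cForm]
  | case2 x h0 h1 =>
    obtain ⟨s, rfl⟩ := List.length_eq_one_iff.mp h1
    have hs := hp s (by simp)
    rw [simplify_tile_alt]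
    simp only [List.headI]
    fin_cases hs <;> decide
  | case3 x h0 h1 mid ih1 ih2 =>
    rw [simplify_tile_alt]
    simp only [dif_neg h0, dif_neg h1]
    have key : ∀ a : String, (List.count a x : Int)
        = List.count a (x.take (x.length / 2)) + List.count a (x.drop (x.length / 2)) := by
      intro a
      conv_lhs => rw [← List.take_append_drop (x.length / 2) x]
      push_cast [List.count_append]; ring
    rw [ih1 (fun s hs => hp s (List.take_subset _ _ hs)),
        ih2 (fun s hs => hp s (List.drop_subset _ _ hs))]
    simp only [cForm, Prod.mk.injEq, key]
    constructor <;> ring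

-- ===== VERDICT (by name: the statement is the Claim_ definition above) =====
theorem simplify_tile_spec : Claim_equal_simplify_tile := by
  intro tile_pos _ hp
  unfold Spec_simplify_tile
  rw [a_eq_cForm, b_eq_cForm tile_pos hp]
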